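-- pv_equiv track=rewrite | github.com/oscarrobinson/py-advent-of-code | 2024_07/2024_07.py | is_valid_eq
-- ===== SOURCE A (Python) =====
-- def is_valid_eq(exp_result: int, nums: list[int]) -> bool:
--     # DFS to find a valid eq
--     stack = []
--     stack.append((nums[0], nums[1:]))
--     while stack:
--         running_result, rem_nums = stack.pop()
--         if len(rem_nums) == 0:
--             if running_result == exp_result:
--                 return True
--         elif running_result <= exp_result:
--             stack.append((running_result * rem_nums[0], rem_nums[1:]))
--             stack.append((running_result + rem_nums[0], rem_nums[1:]))
--     # Our DFS found no combo of operators that solved the equation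
--     # Therefore the equation is not valid so return False
--     return False
-- ===== SOURCE B (Python) =====
-- def is_valid_eq(exp_result: int, nums: list[int]) -> bool:
--     # Recursive search over the suffix of remaining numbers, same pruning guard.
--     def helper(running, rem):
--         if not rem:
--             return running == exp_result
--         if running <= exp_result:
--             return helper(running * rem[0], rem[1:]) or helper(running + rem[0], rem[1:])
--         return False
--     return helper(nums[0], nums[1:])
-- ===== Notes on version B (the rewrite author's own statement) =====
-- stated objective: simpler
-- what changed: Replaced the explicit-stack DFS loop over (running,remaining) tuples by a direct recursive helper over the remaining-numbers suffix with the same pruning guard.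
import Mathlib
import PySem

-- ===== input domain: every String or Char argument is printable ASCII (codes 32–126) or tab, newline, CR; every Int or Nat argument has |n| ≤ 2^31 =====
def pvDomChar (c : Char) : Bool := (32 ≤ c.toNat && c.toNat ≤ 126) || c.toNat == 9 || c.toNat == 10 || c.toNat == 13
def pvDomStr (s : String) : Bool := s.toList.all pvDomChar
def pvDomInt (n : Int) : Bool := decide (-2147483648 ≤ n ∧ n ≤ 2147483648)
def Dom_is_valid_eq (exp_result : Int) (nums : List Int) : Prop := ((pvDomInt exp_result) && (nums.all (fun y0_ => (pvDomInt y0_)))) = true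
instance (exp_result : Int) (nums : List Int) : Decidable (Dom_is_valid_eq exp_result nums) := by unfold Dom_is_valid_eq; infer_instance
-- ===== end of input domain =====

-- B replaces A's explicit-stack DFS by a recursive helper over the remaining suffix (simpler decomposition, same pruning).

-- ===== PORT A =====
-- termination facts for the stack measure (cited by the port's decreasing_by)
theorem pv_pow3_pos (k : Nat) : 0 < 3 ^ k := Nat.pow_pos (by norm_num)
theorem pv_pow3_push (k : Nat) : 3 ^ k + 3 ^ k < 3 ^ (k + 1) := by
  have := pv_pow3_pos k; rw [pow_succ]; omega

-- A's while-loop over the explicit stack; the stack's head is its top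
-- (Python appends the '*' branch then the '+' branch, so the '+' branch is popped first).
def pvALoop (exp_result : Int) : List (Int × List Int) → Bool
  | [] => false
  | (running_result, rem_nums) :: stack =>
    match rem_nums with
    | [] =>
      if running_result = exp_result then true
      else pvALoop exp_result stack
    | x :: rest =>
      if running_result ≤ exp_result then
        pvALoop exp_result ((running_result + x, rest) :: (running_result * x, rest) :: stack)
      else
        pvALoop exp_result stack
termination_by s => (s.map (fun p => 3 ^ p.2.length)).sum
decreasing_by
  all_goals simp only [List.map_cons, List.sum_cons, List.length_cons]
  · have := pv_pow3_pos ([] : List Int).length; omega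
  · have := pv_pow3_push rest.length; omega
  · have := pv_pow3_pos (rest.length + 1); omega

def is_valid_eq (exp_result : Int) (nums : List Int) : Bool :=
  match nums with
  | [] => false   -- Python raises IndexError here (nums[0]); excluded by Pre_
  | n :: rest => pvALoop exp_result [(n, rest)]

-- ===== PORT B =====
def pvBHelper (exp_result : Int) (running : Int) : List Int → Bool
  | [] => running = exp_result
  | x :: rest =>
    if running ≤ exp_result then
      pvBHelper exp_result (running * x) rest || pvBHelper exp_result (running + x) rest
    else false

def is_valid_eq_alt (exp_result : Int) (nums : List Int) : Bool :=
  match nums with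
  | [] => false   -- B's Python raises IndexError here too; excluded by Pre_
  | n :: rest => pvBHelper exp_result n rest

-- ===== PRECONDITION & SPEC =====
-- Pre_ excludes only the empty list, on which both Pythons raise IndexError (nums[0]).
def Pre_is_valid_eq (exp_result : Int) (nums : List Int) : Prop := nums ≠ []
instance (exp_result : Int) (nums : List Int) : Decidable (Pre_is_valid_eq exp_result nums) := by unfold Pre_is_valid_eq; infer_instance
def pvWitness_is_valid_eq : Int × List Int := (6, [2, 3])

def Spec_is_valid_eq (exp_result : Int) (nums : List Int) (out : Bool) : Prop := out = is_valid_eq_alt exp_result nums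
instance (exp_result : Int) (nums : List Int) (out : Bool) : Decidable (Spec_is_valid_eq exp_result nums out) := by unfold Spec_is_valid_eq; infer_instance

-- ===== CLAIM (what is proved, stated in full; the proofs are below) =====
def Claim_equal_is_valid_eq : Prop := ∀ (exp_result : Int) (nums : List Int), Dom_is_valid_eq exp_result nums → Pre_is_valid_eq exp_result nums → Spec_is_valid_eq exp_result nums (is_valid_eq exp_result nums)

-- ===== LEMMAS AND PROOFS =====
-- Invariant: the stack loop returns true iff some stack entry succeeds under the recursive helper.
theorem pvALoop_eq_any (exp_result : Int) (s : List (Int × List Int)) :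
    pvALoop exp_result s = s.any (fun p => pvBHelper exp_result p.1 p.2) := by
  induction s using pvALoop.induct exp_result with
  | case1 => simp [pvALoop]
  | case2 stack => simp [pvALoop, pvBHelper]
  | case3 running stack h ih => simp [pvALoop, pvBHelper, h, ih]
  | case4 running stack x rest h ih =>
    simp only [pvALoop, h, if_true, ih, List.any_cons]
    simp only [pvBHelper, h, if_true]
    cases pvBHelper exp_result (running + x) rest <;>
      cases pvBHelper exp_result (running * x) rest <;> simp
  | case5 running stack x rest h ih => simp [pvALoop, pvBHelper, h, ih]

-- ===== VERDICT (by name: the statement is the Claim_ definition above) =====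
theorem is_valid_eq_spec : Claim_equal_is_valid_eq := by
  intro exp_result nums _ hpre
  unfold Spec_is_valid_eq
  match nums with
  | [] => exact absurd rfl hpre
  | n :: rest => simp [is_valid_eq, is_valid_eq_alt, pvALoop_eq_any]
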